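-- pv_equiv track=rewrite | github.com/Aidhen/Kattis | Python/Beekepeer.py | billsWord
-- ===== SOURCE A (Python) =====
-- def billsWord(wordsList): #controlla la lista di parole e sceglie quella con maggior doppie vocali
--     indexMax = -1
--     max = 0
--     word = ""
--     vocal = {"a","e","i","o","u","y"}
--     for i in range(len(wordsList)):
--         word = wordsList[i]
--         counter = 0
--         for j in range(len(word)-1):
--             if len(word) > 1 and word[j] == word[j+1] and word[j] in vocal:
--                 if j  < len(word) - 2 and word[j+1] == word[j+2]:
--                     break
--                 counter += 1
--             if counter > max:
--                 max = counter
--                 indexMax = i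
--     return indexMax
-- ===== SOURCE B (Python) =====
-- def billsWord(wordsList):
--     vowels = "aeiouy"
--
--     def score(word):
--         # run-length walk: +1 per vowel run of length exactly 2,
--         # stop at the first vowel run of length >= 3
--         c = 0
--         i = 0
--         n = len(word)
--         while i < n:
--             j = i
--             while j < n and word[j] == word[i]:
--                 j += 1
--             if word[i] in vowels:
--                 if j - i >= 3:
--                     return c
--                 if j - i == 2:
--                     c += 1
--             i = j
--         return c
--
--     best = 0
--     idx = -1
--     for i, w in enumerate(wordsList):
--         s = score(w)
--         if s > best:
--             best, idx = s, i
--     return idx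
-- ===== Notes on version B (the rewrite author's own statement) =====
-- stated objective: alternative
-- what changed: Replaces the index-based pairwise scan with a run-length walk (maximal runs of equal characters: +1 per vowel run of length exactly 2, stop at the first vowel run of length >= 3) and replaces the per-character running-max update with a single per-word score compared once against the running best.
import Mathlib
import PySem

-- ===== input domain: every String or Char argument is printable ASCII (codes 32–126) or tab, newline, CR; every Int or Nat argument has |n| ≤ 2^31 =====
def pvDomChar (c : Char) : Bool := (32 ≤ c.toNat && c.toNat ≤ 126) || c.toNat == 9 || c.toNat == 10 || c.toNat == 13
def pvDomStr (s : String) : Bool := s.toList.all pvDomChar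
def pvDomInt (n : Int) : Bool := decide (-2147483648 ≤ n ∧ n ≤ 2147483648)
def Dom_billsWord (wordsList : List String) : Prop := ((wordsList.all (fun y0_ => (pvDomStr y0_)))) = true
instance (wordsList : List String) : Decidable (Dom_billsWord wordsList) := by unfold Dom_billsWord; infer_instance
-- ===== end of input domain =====

-- B replaces A's pairwise index scan with a run-length walk over maximal runs and a
-- single per-word score compared against the running best (objective: alternative).

-- ===== PORT A =====
-- vocal = {"a","e","i","o","u","y"}
def pvVocal : PySem.Set Char := PySem.Set.ofList ['a', 'e', 'i', 'o', 'u', 'y']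

-- A's inner 'for j in range(len(word)-1)' loop, with its break; state (counter, max, indexMax).
-- word[j] is read with List.getD: every index the loop visits satisfies j + 2 ≤ len(word) + 1,
-- where Python's word[j], word[j+1] and (guarded by j < len-2) word[j+2] are all in range,
-- so the default is never used (exact for Python here).
def billsWordInner (word : List Char) (i : Int) :
    List Nat → Int → Int → Int → Int × Int
  | [], _counter, mx, im => (mx, im)
  | j :: js, counter, mx, im =>
    if word.length > 1 ∧ word.getD j ' ' = word.getD (j + 1) ' '
        ∧ pvVocal.contains (word.getD j ' ') then
      if j < word.length - 2 ∧ word.getD (j + 1) ' ' = word.getD (j + 2) ' ' then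
        (mx, im)   -- break
      else
        let counter' := counter + 1
        if counter' > mx then billsWordInner word i js counter' counter' i
        else billsWordInner word i js counter' mx im
    else
      if counter > mx then billsWordInner word i js counter counter i
      else billsWordInner word i js counter mx im

-- 'for i in range(len(wordsList))' over Nat indices (range of a nonnegative length is exact);
-- state (indexMax, max); wordsList[i] via getD — the index is always in range
def billsWord (wordsList : List String) : Int :=
  ((List.range wordsList.length).foldl
    (fun (st : Int × Int) i =>
      let word := (wordsList.getD i "").toList
      let r := billsWordInner word (i : Int) (List.range (word.length - 1)) 0 st.2 st.1
      (r.2, r.1))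
    (-1, 0)).1

-- ===== PORT B =====
-- membership 'ch in "aeiouy"' ported as membership in the list of its characters
def pvVowelsB : List Char := ['a', 'e', 'i', 'o', 'u', 'y']

-- score(word): walk maximal runs (the inner 'while word[j] == word[i]' = takeWhile/dropWhile
-- on the suffix); +1 per vowel run of length exactly 2, stop at the first vowel run of length ≥ 3
def scoreB : List Char → Int
  | [] => 0
  | c :: cs =>
    let run := cs.takeWhile (fun x => x = c)
    let rest := cs.dropWhile (fun x => x = c)
    if c ∈ pvVowelsB then
      if run.length + 1 ≥ 3 then 0
      else if run.length + 1 = 2 then 1 + scoreB rest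
      else scoreB rest
    else scoreB rest
termination_by l => l.length
decreasing_by
  all_goals
    simp only [List.length_cons]
    exact Nat.lt_succ_of_le (List.length_dropWhile_le _ _)

-- 'for i, w in enumerate(wordsList)' with state (best, idx)
def billsWord_alt (wordsList : List String) : Int :=
  ((PySem.List.enumerate wordsList 0).foldl
    (fun (st : Int × Int) p =>
      let s := scoreB p.2.toList
      if s > st.1 then (s, p.1) else st)
    (0, -1)).2

-- ===== PRECONDITION & SPEC =====
def Spec_billsWord (wordsList : List String) (out : Int) : Prop := out = billsWord_alt wordsList
instance (wordsList : List String) (out : Int) : Decidable (Spec_billsWord wordsList out) := by unfold Spec_billsWord; infer_instance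

-- ===== CLAIM (what is proved, stated in full; the proofs are below) =====
def Claim_equal_billsWord : Prop := ∀ (wordsList : List String), Dom_billsWord wordsList → Spec_billsWord wordsList (billsWord wordsList)

-- ===== LEMMAS AND PROOFS =====

-- A's inner-loop count, as a structural recursion on the character suffix
def countA : List Char → Int
  | a :: b :: rest =>
    if a = b ∧ a ∈ pvVowelsB then
      if rest.head? = some b then 0 else 1 + countA (b :: rest)
    else countA (b :: rest)
  | _ => 0

theorem countA_nonneg : ∀ l : List Char, 0 ≤ countA l := by
  intro l
  induction l with
  | nil => simp [countA]
  | cons a t ih =>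
    match t, ih with
    | [], _ => simp [countA]
    | b :: rest, ih =>
      simp only [countA]
      split_ifs <;> omega

theorem pvVocal_contains (c : Char) : pvVocal.contains c = true ↔ c ∈ pvVowelsB := by
  simp [pvVocal, pvVowelsB, PySem.Set.contains, PySem.Set.ofList]

theorem getD_of_drop (word : List Char) (j m : Nat) :
    word.getD (j + m) ' ' = (word.drop j).getD m ' ' := by
  simp [List.getD_eq_getElem?_getD, List.getElem?_drop]

theorem countA_eq_scoreB_aux : ∀ (n : Nat) (l : List Char), l.length ≤ n → countA l = scoreB l := by
  intro n
  induction n with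
  | zero =>
    intro l h
    have : l = [] := List.eq_nil_of_length_eq_zero (Nat.le_zero.mp h)
    subst this; simp [countA, scoreB]
  | succ n ih =>
    intro l h
    match l with
    | [] => simp [countA, scoreB]
    | [a] => simp [countA, scoreB]
    | a :: b :: rest =>
      simp only [List.length_cons] at h
      by_cases hab : a = b
      · subst hab
        by_cases hv : a ∈ pvVowelsB
        · cases rest with
          | nil =>
            simp [countA, scoreB, hv]
          | cons c t =>
            by_cases hc : c = a
            · subst hc
              simp [countA, scoreB, hv]
            · have h1 : countA (a :: a :: c :: t) = 1 + countA (a :: c :: t) := by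
                simp [countA, hv, hc, Ne.symm hc]
              have h2 : countA (a :: c :: t) = countA (c :: t) := by
                simp [countA, Ne.symm hc]
              rw [h1, h2, ih (c :: t) (by simp only [List.length_cons] at h ⊢; omega)]
              simp [scoreB, hv, hc]
        · have h1 : countA (a :: a :: rest) = countA (a :: rest) := by
            simp [countA, hv]
          rw [h1, ih (a :: rest) (by simp only [List.length_cons] at h ⊢; omega)]
          simp only [scoreB, List.takeWhile_cons, List.dropWhile_cons]
          simp [hv]
      · have h1 : countA (a :: b :: rest) = countA (b :: rest) := by
          simp [countA, hab]
        rw [h1, ih (b :: rest) (by simp only [List.length_cons] at h ⊢; omega)]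
        simp [scoreB, Ne.symm hab]

theorem countA_eq_scoreB (l : List Char) : countA l = scoreB l :=
  countA_eq_scoreB_aux l.length l le_rfl

theorem inner_eq (word : List Char) (i : Int) :
    ∀ (k j : Nat), j + k + 1 = word.length →
    ∀ (counter mx im : Int), counter ≤ mx →
      billsWordInner word i (List.range' j k) counter mx im =
        (max mx (counter + countA (word.drop j)),
         if counter + countA (word.drop j) > mx then i else im) := by
  intro k
  induction k with
  | zero =>
    intro j hj counter mx im hle
    have hdrop : (word.drop j).length = 1 := by
      rw [List.length_drop]; omega
    have h0 : countA (word.drop j) = 0 := by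
      match hd : word.drop j, hdrop with
      | [x], _ => rfl
    simp only [List.range', billsWordInner, h0]
    refine Prod.ext ?_ ?_ <;> simp <;> omega
  | succ k ih =>
    intro j hj counter mx im hle
    have hlen : 2 ≤ (word.drop j).length := by rw [List.length_drop]; omega
    obtain ⟨a, b, rest, hd⟩ : ∃ a b rest, word.drop j = a :: b :: rest := by
      match hd : word.drop j, hlen with
      | a :: b :: rest, _ => exact ⟨a, b, rest, rfl⟩
    have hrest : rest.length = k := by
      have := congrArg List.length hd
      rw [List.length_drop] at this
      simp at this; omega
    have e0 : word.getD j ' ' = a := by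
      have := getD_of_drop word j 0; rw [Nat.add_zero] at this; rw [this, hd]; rfl
    have e1 : word.getD (j + 1) ' ' = b := by
      rw [getD_of_drop word j 1, hd]; rfl
    have e2 : word.getD (j + 2) ' ' = rest.getD 0 ' ' := by
      rw [getD_of_drop word j 2, hd]; rfl
    have edrop1 : word.drop (j + 1) = b :: rest := by
      have : word.drop (j + 1) = (word.drop j).drop 1 := by
        rw [List.drop_drop]
      rw [this, hd]; rfl
    have hC' : 0 ≤ countA (b :: rest) := countA_nonneg _
    rw [List.range'_succ]
    simp only [billsWordInner]
    by_cases hpair : a = b ∧ a ∈ pvVowelsB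
    · obtain ⟨hab, hv⟩ := hpair
      subst hab
      rw [if_pos ⟨by omega, by rw [e0, e1], by
        rw [e0]; exact (pvVocal_contains a).mpr hv⟩]
      by_cases htr : rest.head? = some a
      · obtain ⟨t, rfl⟩ : ∃ t, rest = a :: t := by
          cases rest with
          | nil => simp at htr
          | cons c t => simp at htr; exact ⟨t, by rw [htr]⟩
        rw [if_pos ⟨by simp at hrest; omega, by rw [e1, e2]; rfl⟩]
        have hc0 : countA (word.drop j) = 0 := by
          rw [hd]; simp [countA, hv]
        rw [hc0]
        refine Prod.ext ?_ ?_ <;> simp <;> omega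
      · have hcond2 : ¬(j < word.length - 2 ∧ word.getD (j + 1) ' ' = word.getD (j + 2) ' ') := by
          cases rest with
          | nil => rintro ⟨h1, -⟩; simp at hrest; omega
          | cons c t =>
            rintro ⟨-, h2⟩
            rw [e1, e2] at h2
            simp only [List.getD_cons_zero] at h2
            exact htr (by simp [h2])
        rw [if_neg hcond2]
        have hcA : countA (word.drop j) = 1 + countA (a :: rest) := by
          rw [hd]; simp [countA, hv, htr]
        rw [hcA, ← edrop1]
        by_cases hchk : counter + 1 > mx
        · simp only [hchk, if_pos]
          rw [ih (j + 1) (by omega) (counter + 1) (counter + 1) i le_rfl]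
          rw [edrop1]
          refine Prod.ext ?_ ?_ <;> simp <;> omega
        · simp only [hchk, if_false]
          rw [ih (j + 1) (by omega) (counter + 1) mx im (by omega), edrop1, add_assoc]
    · rw [if_neg (by
        rintro ⟨-, h2, h3⟩
        rw [e0, e1] at h2
        rw [e0] at h3
        exact hpair ⟨h2, (pvVocal_contains a).mp h3⟩)]
      have hcA : countA (word.drop j) = countA (b :: rest) := by
        rw [hd]; simp only [countA]; rw [if_neg hpair]
      rw [if_neg (by omega), hcA, ← edrop1]
      exact ih (j + 1) (by omega) counter mx im hle

theorem inner_full (word : List Char) (i mx im : Int) (h : 0 ≤ mx) :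
    billsWordInner word i (List.range (word.length - 1)) 0 mx im =
      (max mx (scoreB word), if scoreB word > mx then i else im) := by
  cases word with
  | nil =>
    simp only [List.length_nil, Nat.zero_sub, List.range_zero, billsWordInner]
    have h1 : scoreB [] = 0 := by simp [scoreB]
    rw [h1]
    refine Prod.ext ?_ ?_ <;> simp <;> omega
  | cons c cs =>
    rw [List.range_eq_range']
    have := inner_eq (c :: cs) i ((c :: cs).length - 1) 0 (by simp) 0 mx im h
    simp only [List.drop_zero, zero_add] at this
    rw [this, countA_eq_scoreB]

theorem foldl_range_enum {α β : Type} (d : α) (f : β → Int → α → β) :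
    ∀ (xs : List α) (s : Nat) (init : β),
      (List.range xs.length).foldl (fun st i => f st ((s + i : Nat) : Int) (xs.getD i d)) init
      = (PySem.List.enumerate xs (s : Int)).foldl (fun st p => f st p.1 p.2) init := by
  intro xs
  induction xs with
  | nil => intro s init; simp [PySem.List.enumerate]
  | cons x xs ih =>
    intro s init
    rw [List.length_cons, List.range_succ_eq_map, PySem.List.enumerate_cons]
    simp only [List.foldl_cons, List.foldl_map, Nat.add_zero, List.getD_cons_zero,
      List.getD_cons_succ]
    have hc : ((s : Int) + 1) = ((s + 1 : Nat) : Int) := by push_cast; ring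
    rw [hc]
    have := ih (s + 1) (f init (s : Int) x)
    convert this using 2
    funext st i
    congr 1
    push_cast; ring

theorem fold_sim : ∀ (l : List (Int × String)) (mx im : Int), 0 ≤ mx →
    l.foldl (fun (st : Int × Int) p =>
        let word := p.2.toList
        let r := billsWordInner word p.1 (List.range (word.length - 1)) 0 st.2 st.1
        (r.2, r.1)) (im, mx)
    = Prod.swap (l.foldl (fun (st : Int × Int) p =>
        let s := scoreB p.2.toList
        if s > st.1 then (s, p.1) else st) (mx, im)) := by
  intro l
  induction l with
  | nil => intro mx im h; rfl
  | cons p l ih =>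
    intro mx im h
    simp only [List.foldl_cons]
    rw [inner_full p.2.toList p.1 mx im h]
    by_cases hgt : scoreB p.2.toList > mx
    · have h1 : max mx (scoreB p.2.toList) = scoreB p.2.toList := by omega
      simp only [hgt, if_pos, h1]
      exact ih (scoreB p.2.toList) p.1 (by omega)
    · have h1 : max mx (scoreB p.2.toList) = mx := by omega
      simp only [hgt, if_false, h1]
      exact ih mx im h

theorem billsWord_eq_alt (wordsList : List String) :
    billsWord wordsList = billsWord_alt wordsList := by
  unfold billsWord billsWord_alt
  have h := foldl_range_enum ("" : String)
    (fun (st : Int × Int) (n : Int) (w : String) =>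
      let word := w.toList
      let r := billsWordInner word n (List.range (word.length - 1)) 0 st.2 st.1
      (r.2, r.1)) wordsList 0 ((-1 : Int), (0 : Int))
  simp only [Nat.zero_add, Int.natCast_zero] at h
  rw [h, fold_sim _ 0 (-1) le_rfl]
  simp [Prod.swap]

-- ===== VERDICT (by name: the statement is the Claim_ definition above) =====
theorem billsWord_spec : Claim_equal_billsWord := by
  intro wordsList _
  unfold Spec_billsWord
  exact billsWord_eq_alt wordsList
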